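-- pv_equiv track=rewrite | github.com/MrHamdulay/csc3-capstone | examples/data/Assignment_4/xlxsab001/piglatin.py | a_pos
-- ===== SOURCE A (Python) =====
-- def a_pos(word):
--     count = 0
--     pos1 = 0
--     pos2 = 0
--     for i in range(len(word)-1,-1,-1):
--         if word[i] == "a":count+=1
--         if count == 2:
--             pos1=i
--             count+=1
--     for i in range(len(word)-1,-1,-1):
--         if word[i] == "a":
--             pos2 = i
--             break
--     return pos1, pos2
-- ===== SOURCE B (Python) =====
-- def a_pos(word):
--     positions = [i for i, c in enumerate(word) if c == "a"]
--     pos2 = positions[-1] if positions else 0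
--     pos1 = positions[-2] if len(positions) >= 2 else 0
--     return pos1, pos2
-- ===== Notes on version B (the rewrite author's own statement) =====
-- stated objective: alternative
-- what changed: A makes two backward index scans over the string with a counter state machine (count jumps 1->2->3 to latch the second-last match position); B makes one forward pass that builds the list of all match positions and simply selects its last and second-last entries (default 0).
import Mathlib
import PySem

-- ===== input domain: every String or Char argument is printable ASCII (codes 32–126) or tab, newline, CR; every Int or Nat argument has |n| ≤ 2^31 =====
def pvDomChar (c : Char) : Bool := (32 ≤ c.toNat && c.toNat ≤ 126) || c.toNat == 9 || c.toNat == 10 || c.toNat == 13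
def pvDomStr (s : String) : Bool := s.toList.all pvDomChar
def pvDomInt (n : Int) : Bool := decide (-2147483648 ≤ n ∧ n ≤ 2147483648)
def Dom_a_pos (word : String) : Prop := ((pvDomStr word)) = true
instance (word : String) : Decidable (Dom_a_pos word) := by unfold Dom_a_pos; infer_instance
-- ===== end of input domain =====

-- B replaces A's reverse counter-scan + second reverse scan by one forward pass that
-- collects all 'a' positions and selects the last two entries (objective: alternative).

-- ===== PORT A =====
-- body of A's first loop (count/pos1 update for index i)
def aStep (cs : List Char) (st : Int × Int) (i : Int) : Int × Int :=
  let count := if PySem.List.pyGet? cs i = some 'a' then st.1 + 1 else st.1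
  if count = 2 then (count + 1, i) else (count, st.2)

-- second loop of A: scans indices, breaks at the first 'a' (port of the loop with `break`)
def aSecondLoop (cs : List Char) : List Int → Int → Int
  | [], pos2 => pos2
  | i :: rest, pos2 =>
    if PySem.List.pyGet? cs i = some 'a' then i else aSecondLoop cs rest pos2

def a_pos (word : String) : Int × Int :=
  let cs := word.toList
  let n : Int := (cs.length : Int)
  let st := (PySem.List.pyRange (n - 1) (-1) (-1)).foldl (aStep cs) (0, 0)
  let pos2 := aSecondLoop cs (PySem.List.pyRange (n - 1) (-1) (-1)) 0
  (st.2, pos2)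

-- ===== PORT B =====
def a_pos_alt (word : String) : Int × Int :=
  let positions := ((PySem.List.enumerate word.toList 0).filter (fun p => p.2 == 'a')).map (fun p => p.1)
  let pos2 := if positions ≠ [] then (PySem.List.pyGet? positions (-1)).getD 0 else 0
  let pos1 := if 2 ≤ positions.length then (PySem.List.pyGet? positions (-2)).getD 0 else 0
  (pos1, pos2)

-- ===== PRECONDITION & SPEC =====
def Spec_a_pos (word : String) (out : Int × Int) : Prop := out = a_pos_alt word
instance (word : String) (out : Int × Int) : Decidable (Spec_a_pos word out) := by unfold Spec_a_pos; infer_instance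

-- ===== CLAIM (what is proved, stated in full; the proofs are below) =====
def Claim_equal_a_pos : Prop := ∀ (word : String), Dom_a_pos word → Spec_a_pos word (a_pos word)

-- ===== LEMMAS AND PROOFS =====

-- B's positions list, over a char list
def posList (cs : List Char) : List Int :=
  ((PySem.List.enumerate cs 0).filter (fun p => p.2 == 'a')).map (fun p => p.1)

-- the same positions, highest first (the order A's reverse scans meet them)
def revPos (cs : List Char) : List Int := (posList cs).reverse

lemma posList_append (ds : List Char) (c : Char) :
    posList (ds ++ [c]) = posList ds ++ (if c = 'a' then [(ds.length : Int)] else []) := by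
  unfold posList
  rw [PySem.List.enumerate_append, List.filter_append, List.map_append]
  by_cases h : c = 'a' <;>
    simp [PySem.List.enumerate, h]

lemma revPos_append (ds : List Char) (c : Char) :
    revPos (ds ++ [c]) = (if c = 'a' then ((ds.length : Int)) :: revPos ds else revPos ds) := by
  unfold revPos
  rw [posList_append]
  by_cases h : c = 'a' <;> simp [h]

lemma pyGet?_append_left (ds : List Char) (c : Char) {i : Int}
    (h0 : 0 ≤ i) (h1 : i < (ds.length : Int)) :
    PySem.List.pyGet? (ds ++ [c]) i = PySem.List.pyGet? ds i := by
  rw [PySem.List.pyGet?_of_nonneg _ h0, PySem.List.pyGet?_of_nonneg _ h0]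
  have : i.toNat < ds.length := by omega
  rw [List.getElem?_append_left this]

lemma aSecondLoop_congr (ds : List Char) (c : Char) (L : List Int)
    (hL : ∀ i ∈ L, 0 ≤ i ∧ i < (ds.length : Int)) (p : Int) :
    aSecondLoop (ds ++ [c]) L p = aSecondLoop ds L p := by
  induction L with
  | nil => rfl
  | cons i rest ih =>
    have hi := hL i (by simp)
    simp only [aSecondLoop, pyGet?_append_left ds c hi.1 hi.2]
    split
    · rfl
    · exact ih (fun j hj => hL j (by simp [hj]))

lemma aSecondLoop_spec (cs : List Char) (p : Int) :
    aSecondLoop cs (PySem.List.pyRange ((cs.length : Int) - 1) (-1) (-1)) p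
      = (revPos cs).headD p := by
  induction cs using List.reverseRecOn with
  | nil =>
    rw [PySem.List.pyRange_neg_one_eq_nil (by norm_num)]
    simp [aSecondLoop, revPos, posList, PySem.List.enumerate]
  | append_singleton ds c ih =>
    have hlen : (((ds ++ [c]).length : Int)) - 1 = (ds.length : Int) := by
      simp only [List.length_append, List.length_cons, List.length_nil]
      push_cast; ring
    rw [hlen, PySem.List.pyRange_neg_one_cons (by omega)]
    simp only [aSecondLoop, PySem.List.pyGet?_append_length ds [] c]
    rw [revPos_append]
    by_cases h : c = 'a'
    · simp [h]
    · have hr : ∀ i ∈ PySem.List.pyRange ((ds.length : Int) - 1) (-1) (-1),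
          0 ≤ i ∧ i < (ds.length : Int) := by
        intro i hi
        rw [PySem.List.mem_pyRange_neg_one] at hi
        omega
      rw [if_neg (by simp [h]), aSecondLoop_congr ds c _ hr, ih]
      simp [h]

-- what A's first loop computes, given the reachable entry states 0, 1 and ≥ 3
lemma aFirstLoop_spec (cs : List Char) (st : Int × Int)
    (hst : st.1 = 0 ∨ st.1 = 1 ∨ 3 ≤ st.1) :
    (PySem.List.pyRange ((cs.length : Int) - 1) (-1) (-1)).foldl (aStep cs) st
      = (if st.1 = 0 then
           (match revPos cs with
            | [] => (0, st.2)
            | [_] => (1, st.2)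
            | _ :: y :: _ => (((revPos cs).length : Int) + 1, y))
         else if st.1 = 1 then
           (match revPos cs with
            | [] => (1, st.2)
            | x :: _ => (((revPos cs).length : Int) + 2, x))
         else (st.1 + ((revPos cs).length : Int), st.2)) := by
  induction cs using List.reverseRecOn generalizing st with
  | nil =>
    rw [PySem.List.pyRange_neg_one_eq_nil (by norm_num)]
    have hrev : revPos ([] : List Char) = [] := by
      simp [revPos, posList, PySem.List.enumerate]
    rw [hrev]
    obtain ⟨s1, s2⟩ := st
    rcases hst with h | h | h <;> split_ifs <;> simp_all
  | append_singleton ds c ih =>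
    have hlen : (((ds ++ [c]).length : Int)) - 1 = (ds.length : Int) := by
      simp only [List.length_append, List.length_cons, List.length_nil]
      push_cast; ring
    rw [hlen, PySem.List.pyRange_neg_one_cons (by omega), List.foldl_cons]
    have hr : ∀ (acc : Int × Int), ∀ i ∈ PySem.List.pyRange ((ds.length : Int) - 1) (-1) (-1),
        aStep (ds ++ [c]) acc i = aStep ds acc i := by
      intro acc i hi
      rw [PySem.List.mem_pyRange_neg_one] at hi
      unfold aStep
      rw [pyGet?_append_left ds c (by omega) (by omega)]
    rw [PySem.List.foldl_congr_mem _ _ _ _ hr, revPos_append]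
    by_cases h : c = 'a'
    · rcases hst with h0 | h1 | h3
      · -- count 0 → 1
        have hstep : aStep (ds ++ [c]) st ((ds.length : Int)) = (1, st.2) := by
          unfold aStep
          rw [PySem.List.pyGet?_append_length ds [] c]
          simp [h, h0]
        rw [hstep, ih (1, st.2) (by right; left; rfl)]
        rcases hq : revPos ds with _ | ⟨x, t⟩ <;> (simp [h0, h]; try omega)
      · -- count 1 → 2 → record, count 3
        have hstep : aStep (ds ++ [c]) st ((ds.length : Int)) = (3, (ds.length : Int)) := by
          unfold aStep
          rw [PySem.List.pyGet?_append_length ds [] c]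
          simp [h, h1]
        rw [hstep, ih (3, (ds.length : Int)) (by right; right; show (3:Int) ≤ 3; norm_num)]
        rcases hq : revPos ds with _ | ⟨x, t⟩ <;> (simp [h1, h]; try omega)
      · -- count ≥ 3
        have hstep : aStep (ds ++ [c]) st ((ds.length : Int)) = (st.1 + 1, st.2) := by
          unfold aStep
          rw [PySem.List.pyGet?_append_length ds [] c]
          have : st.1 + 1 ≠ 2 := by omega
          simp [h, this]
        rw [hstep, ih (st.1 + 1, st.2) (by right; right; show (3:Int) ≤ st.1 + 1; omega)]
        have h0 : st.1 ≠ 0 := by omega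
        have h1 : st.1 ≠ 1 := by omega
        have ha : st.1 + 1 ≠ 0 := by omega
        have hb : st.1 + 1 ≠ 1 := by omega
        simp [h, h0, h1, ha, hb, Prod.ext_iff]
        omega
    · -- c not 'a': state unchanged
      have hstep : aStep (ds ++ [c]) st ((ds.length : Int)) = st := by
        unfold aStep
        rw [PySem.List.pyGet?_append_length ds [] c]
        have : st.1 ≠ 2 := by rcases hst with h'|h'|h' <;> omega
        simp [h, this]
      rw [hstep, ih st hst]
      simp [h]

lemma posList_toList (word : String) :
    ((PySem.List.enumerate word.toList 0).filter (fun p => p.2 == 'a')).map (fun p => p.1)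
      = posList word.toList := rfl

-- ===== VERDICT (by name: the statement is the Claim_ definition above) =====
theorem a_pos_spec : Claim_equal_a_pos := by
  intro word _
  unfold Spec_a_pos a_pos a_pos_alt
  rw [posList_toList]
  set cs := word.toList with hcs
  have hL2 := aSecondLoop_spec cs 0
  have hL1 := aFirstLoop_spec cs (0, 0) (by simp)
  simp only [hL2, hL1]
  rcases hq : revPos cs with _ | ⟨x, t⟩
  · -- no 'a'
    have hp : posList cs = [] := by
      have := congrArg List.reverse hq
      simpa [revPos] using this
    simp [hp]
  · rcases ht : t with _ | ⟨y, t2⟩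
    · -- exactly one 'a'
      subst ht
      have hp : posList cs = [x] := by
        have := congrArg List.reverse hq
        simpa [revPos] using this
      simp [hp, PySem.List.pyGet?_neg_one]
    · -- at least two 'a's
      subst ht
      have hp : posList cs = (y :: t2).reverse ++ [x] := by
        have := congrArg List.reverse hq
        simpa [revPos] using this
      have hlen : 2 ≤ (posList cs).length := by simp [hp]
      have hlast : (PySem.List.pyGet? (posList cs) (-1)).getD 0 = x := by
        rw [PySem.List.pyGet?_neg_one, hp]
        simp
      have hsnd : (PySem.List.pyGet? (posList cs) (-2)).getD 0 = y := by
        have h2 : ((-2 : Int)) = -((2 : Nat) : Int) := by norm_num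
        rw [h2, PySem.List.pyGet?_neg_natCast _ 2 (by norm_num) hlen, hp]
        have : ((y :: t2).reverse ++ [x]).length - 2 = t2.length := by simp
        rw [this]
        simp
      have hne : posList cs ≠ [] := by simp [hp]
      simp only [hne, hlen, if_pos, hlast, hsnd, ne_eq, not_false_eq_true]
      simp
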